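-- pv_equiv track=rewrite | github.com/khoubyari/gptdeploy | src/apis/jina_cloud.py | shorten_logs
-- ===== SOURCE A (Python) =====
-- def shorten_logs(relevant_lines):
--     # handle duplicate error messages
--     for index, line in enumerate(relevant_lines):
--         if '--- Captured stderr call ----' in line:
--             relevant_lines = relevant_lines[:index]
--     # filter pip install logs
--     relevant_lines = [line for line in relevant_lines if ' Requirement already satisfied: ' not in line]
--     # filter version not found logs
--     for index, line in enumerate(relevant_lines):
--         if 'ERROR: Could not find a version that satisfies the requirement ' in line:
--             start_and_end = line[:150] + '...' + line[-150:]
--             relevant_lines[index] = start_and_end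
--     return relevant_lines
-- ===== SOURCE B (Python) =====
-- def shorten_logs(relevant_lines):
--     out = []
--     for line in relevant_lines:
--         if '--- Captured stderr call ----' in line:
--             break
--         if ' Requirement already satisfied: ' in line:
--             continue
--         if 'ERROR: Could not find a version that satisfies the requirement ' in line:
--             out.append(line[:150] + '...' + line[-150:])
--         else:
--             out.append(line)
--     return out
-- ===== Notes on version B (the rewrite author's own statement) =====
-- stated objective: simpler
-- what changed: Replaces A's three passes (an enumerate loop that repeatedly re-slices the list at marker lines, a filtering comprehension, and a second enumerate loop that mutates entries in place) by one loop that breaks at the first stderr marker, skips pip lines, and appends the possibly-truncated line.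
import Mathlib
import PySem

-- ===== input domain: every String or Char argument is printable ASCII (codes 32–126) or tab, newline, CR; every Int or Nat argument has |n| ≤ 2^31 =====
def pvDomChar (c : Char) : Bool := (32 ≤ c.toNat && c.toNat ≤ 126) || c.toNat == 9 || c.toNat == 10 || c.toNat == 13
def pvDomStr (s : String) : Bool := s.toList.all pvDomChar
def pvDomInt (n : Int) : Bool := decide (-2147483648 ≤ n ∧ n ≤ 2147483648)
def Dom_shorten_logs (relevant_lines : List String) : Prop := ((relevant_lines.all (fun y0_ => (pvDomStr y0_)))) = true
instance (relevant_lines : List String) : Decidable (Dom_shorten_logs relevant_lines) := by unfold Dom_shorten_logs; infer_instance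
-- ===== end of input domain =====

-- B replaces A's three passes (repeated re-slicing, a filter, an in-place mutation loop) by one
-- break/continue loop building the output; same return value, simpler.

-- shared string constants and the line-truncation expression line[:150] + '...' + line[-150:]
def pvMarker : String := "--- Captured stderr call ----"
def pvReq : String := " Requirement already satisfied: "
def pvErr : String := "ERROR: Could not find a version that satisfies the requirement "
def pvTrunc (line : String) : String :=
  String.ofList (PySem.List.slice line.toList none (some 150) ++ "...".toList ++
                 PySem.List.slice line.toList (some (-150)) none)

-- ===== PORT A =====
def shorten_logs (relevant_lines : List String) : List String :=
  -- for index, line in enumerate(relevant_lines): if marker in line: relevant_lines = relevant_lines[:index]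
  -- (the iterator stays over the original list; only the variable is rebound)
  let rl1 := (PySem.List.enumerate relevant_lines 0).foldl
    (fun cur p => if PySem.Str.isIn pvMarker p.2 then PySem.List.slice cur none (some p.1) else cur)
    relevant_lines
  -- [line for line in relevant_lines if ' Requirement already satisfied: ' not in line]
  let rl2 := rl1.filter (fun line => !(PySem.Str.isIn pvReq line))
  -- for index, line in enumerate(relevant_lines): if err in line: relevant_lines[index] = line[:150]+'...'+line[-150:]
  -- (each step reads the element at index before overwriting that same index, so p.2 is the pre-mutation line)
  (PySem.List.enumerate rl2 0).foldl
    (fun cur p => if PySem.Str.isIn pvErr p.2 then cur.set p.1.toNat (pvTrunc p.2) else cur)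
    rl2

-- ===== PORT B =====
def shortenGo : List String → List String
  | [] => []
  | line :: rest =>
    if PySem.Str.isIn pvMarker line then []
    else if PySem.Str.isIn pvReq line then shortenGo rest
    else if PySem.Str.isIn pvErr line then pvTrunc line :: shortenGo rest
    else line :: shortenGo rest

def shorten_logs_alt (relevant_lines : List String) : List String :=
  shortenGo relevant_lines

-- ===== PRECONDITION & SPEC =====
def Spec_shorten_logs (relevant_lines : List String) (out : List String) : Prop := out = shorten_logs_alt relevant_lines
instance (relevant_lines : List String) (out : List String) : Decidable (Spec_shorten_logs relevant_lines out) := by unfold Spec_shorten_logs; infer_instance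

-- ===== CLAIM (what is proved, stated in full; the proofs are below) =====
def Claim_equal_shorten_logs : Prop := ∀ (relevant_lines : List String), Dom_shorten_logs relevant_lines → Spec_shorten_logs relevant_lines (shorten_logs relevant_lines)

-- ===== LEMMAS AND PROOFS =====

-- once the accumulator is no longer than the current enumerate index, every later slice is a no-op
theorem fold1_idle (xs : List String) (s : Nat) (cur : List String) (h : cur.length ≤ s) :
    (PySem.List.enumerate xs (s : Int)).foldl
      (fun cur p => if PySem.Str.isIn pvMarker p.2 then PySem.List.slice cur none (some p.1) else cur)
      cur = cur := by
  induction xs generalizing s cur with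
  | nil => simp [PySem.List.enumerate_nil]
  | cons x rest ih =>
    simp only [PySem.List.enumerate_cons, List.foldl_cons]
    have hc : ((s : Int) + 1) = ((s + 1 : Nat) : Int) := by push_cast; ring
    by_cases hm : PySem.Str.isIn pvMarker x = true
    · rw [if_pos hm, PySem.List.slice_to_natCast, List.take_of_length_le h, hc,
        ih (s + 1) cur (by omega)]
    · rw [if_neg hm, hc, ih (s + 1) cur (by omega)]

-- A's first loop keeps exactly the prefix before the first marker line
theorem fold1_takeWhile (xs C : List String) :
    (PySem.List.enumerate xs (C.length : Int)).foldl
      (fun cur p => if PySem.Str.isIn pvMarker p.2 then PySem.List.slice cur none (some p.1) else cur)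
      (C ++ xs) = C ++ xs.takeWhile (fun l => !(PySem.Str.isIn pvMarker l)) := by
  induction xs generalizing C with
  | nil => simp [PySem.List.enumerate_nil]
  | cons x rest ih =>
    simp only [PySem.List.enumerate_cons, List.foldl_cons, List.takeWhile_cons]
    by_cases hm : PySem.Str.isIn pvMarker x = true
    · rw [if_pos hm, PySem.List.slice_to_natCast, List.take_left]
      have hc : ((C.length : Int) + 1) = ((C.length + 1 : Nat) : Int) := by push_cast; ring
      rw [hc, fold1_idle rest (C.length + 1) C (by omega)]
      simp only [PySem.Str.isIn_eq] at hm
      simp [hm]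
    · have h1 : C ++ x :: rest = (C ++ [x]) ++ rest := by simp
      have h2 : ((C.length : Int) + 1) = (((C ++ [x]).length : Nat) : Int) := by
        simp
      rw [if_neg hm, h1, h2, ih (C ++ [x])]
      simp only [PySem.Str.isIn_eq] at hm
      simp [hm]

-- A's last loop rewrites each error line in place: it is a map over the list
theorem fold3_map (xs C : List String) :
    (PySem.List.enumerate xs (C.length : Int)).foldl
      (fun cur p => if PySem.Str.isIn pvErr p.2 then cur.set p.1.toNat (pvTrunc p.2) else cur)
      (C ++ xs) = C ++ xs.map (fun l => if PySem.Str.isIn pvErr l then pvTrunc l else l) := by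
  induction xs generalizing C with
  | nil => simp [PySem.List.enumerate_nil]
  | cons x rest ih =>
    simp only [PySem.List.enumerate_cons, List.foldl_cons, List.map_cons]
    by_cases he : PySem.Str.isIn pvErr x = true
    · have hset : (C ++ x :: rest).set ((C.length : Int)).toNat (pvTrunc x)
          = (C ++ [pvTrunc x]) ++ rest := by
        rw [Int.toNat_natCast, List.set_append]
        simp
      have h2 : ((C.length : Int) + 1) = (((C ++ [pvTrunc x]).length : Nat) : Int) := by
        simp
      rw [if_pos he, hset, h2, ih (C ++ [pvTrunc x])]
      simp only [PySem.Str.isIn_eq] at he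
      simp [he]
    · have h1 : C ++ x :: rest = (C ++ [x]) ++ rest := by simp
      have h2 : ((C.length : Int) + 1) = (((C ++ [x]).length : Nat) : Int) := by
        simp
      rw [if_neg he, h1, h2, ih (C ++ [x])]
      simp only [PySem.Str.isIn_eq] at he
      simp [he]

-- B's loop computes the same takeWhile/filter/map composition
theorem shortenGo_eq (xs : List String) :
    shortenGo xs =
      ((xs.takeWhile (fun l => !(PySem.Str.isIn pvMarker l))).filter
          (fun l => !(PySem.Str.isIn pvReq l))).map
        (fun l => if PySem.Str.isIn pvErr l then pvTrunc l else l) := by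
  induction xs with
  | nil => simp [shortenGo]
  | cons x rest ih =>
    simp only [shortenGo, List.takeWhile_cons]
    by_cases hm : PySem.Str.isIn pvMarker x = true
    · simp only [PySem.Str.isIn_eq] at hm
      simp [hm]
    · by_cases hr : PySem.Str.isIn pvReq x = true
      · simp only [PySem.Str.isIn_eq] at hm hr
        simp [hm, hr, ih]
      · by_cases he : PySem.Str.isIn pvErr x = true
        · simp only [PySem.Str.isIn_eq] at hm hr he
          simp [hm, hr, he, ih]
        · simp only [PySem.Str.isIn_eq] at hm hr he
          simp [hm, hr, he, ih]

-- ===== VERDICT (by name: the statement is the Claim_ definition above) =====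
theorem shorten_logs_spec : Claim_equal_shorten_logs := by
  intro relevant_lines _
  show shorten_logs relevant_lines = shorten_logs_alt relevant_lines
  unfold shorten_logs shorten_logs_alt
  rw [shortenGo_eq]
  have h1 := fold1_takeWhile relevant_lines []
  simp only [List.length_nil, Int.natCast_zero, List.nil_append] at h1
  rw [h1]
  have h3 := fold3_map ((relevant_lines.takeWhile (fun l => !(PySem.Str.isIn pvMarker l))).filter
      (fun l => !(PySem.Str.isIn pvReq l))) []
  simpa using h3
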